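-- pv_equiv track=rewrite | github.com/PyWavelets/pywt | doc/source/pyplots/plot_2d_bases.py | wavedec_keys
-- ===== SOURCE A (Python) =====
-- def wavedec_keys(level):
--     """Subband keys corresponding to a wavedec decomposition."""
--     approx = ''
--     coeffs = {}
--     for lev in range(level):
--         for k in ['a', 'd']:
--             coeffs[approx + k] = None
--         approx = 'a' * (lev + 1)
--         if lev < level - 1:
--             coeffs.pop(approx)
--     return list(coeffs.keys())
-- ===== SOURCE B (Python) =====
-- def wavedec_keys(level):
--     """Subband keys corresponding to a wavedec decomposition."""
--     if level < 1:
--         return []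
--     keys = ['a' * i + 'd' for i in range(level - 1)]
--     keys.append('a' * level)
--     keys.append('a' * (level - 1) + 'd')
--     return keys
-- ===== Notes on version B (the rewrite author's own statement) =====
-- stated objective: simpler
-- what changed: Builds the key list directly by a closed-form comprehension (detail keys for i<level-1, then the full-approx key, then the last detail key) instead of A's dict insertion/pop machinery.
import Mathlib
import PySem

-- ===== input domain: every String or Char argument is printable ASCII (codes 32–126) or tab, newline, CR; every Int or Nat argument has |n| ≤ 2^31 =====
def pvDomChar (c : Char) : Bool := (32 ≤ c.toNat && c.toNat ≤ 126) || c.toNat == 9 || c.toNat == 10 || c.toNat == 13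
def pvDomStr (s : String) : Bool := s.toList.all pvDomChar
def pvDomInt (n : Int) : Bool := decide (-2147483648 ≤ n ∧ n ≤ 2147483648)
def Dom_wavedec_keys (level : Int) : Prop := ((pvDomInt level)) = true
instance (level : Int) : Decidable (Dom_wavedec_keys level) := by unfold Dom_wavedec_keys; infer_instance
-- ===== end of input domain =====

-- B drops A's dict insertion/pop machinery and builds the key list directly (simpler); return value only, no mutation.

-- ===== PORT A =====
-- loop body of A's 'for lev in range(level)'
def wavedecBodyA (level : Int) (st : String × PySem.Dict String (Option Unit)) (lev : Int) :
    String × PySem.Dict String (Option Unit) :=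
  let coeffs := ["a", "d"].foldl (fun c k => c.insert (st.1 ++ k) none) st.2
  let approx := String.ofList (PySem.List.pyRepeat ['a'] (lev + 1))
  if lev < level - 1 then
    -- coeffs.pop(approx); the key was just inserted, so the 'none' (KeyError) branch is unreachable
    (approx, match coeffs.pop? approx with
             | some (_, c) => c
             | none => coeffs)
  else (approx, coeffs)

def wavedec_keys (level : Int) : List String :=
  ((PySem.List.pyRange 0 level 1).foldl (wavedecBodyA level) ("", PySem.Dict.empty)).2.keys

-- ===== PORT B =====
def wavedec_keys_alt (level : Int) : List String :=
  if level < 1 then []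
  else
    ((List.range (level - 1).toNat).map (fun i => String.ofList (List.replicate i 'a') ++ "d"))
      ++ [String.ofList (List.replicate level.toNat 'a'),
          String.ofList (List.replicate (level - 1).toNat 'a') ++ "d"]

-- ===== PRECONDITION & SPEC =====
def Spec_wavedec_keys (level : Int) (out : List String) : Prop := out = wavedec_keys_alt level
instance (level : Int) (out : List String) : Decidable (Spec_wavedec_keys level out) := by unfold Spec_wavedec_keys; infer_instance

-- ===== CLAIM (what is proved, stated in full; the proofs are below) =====
def Claim_equal_wavedec_keys : Prop := ∀ (level : Int), Dom_wavedec_keys level → Spec_wavedec_keys level (wavedec_keys level)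

-- ===== LEMMAS AND PROOFS =====

-- the detail key 'a'*i + 'd' and the approximation key 'a'*j
def dkey (i : Nat) : String := String.ofList (List.replicate i 'a' ++ ['d'])
def akey (j : Nat) : String := String.ofList (List.replicate j 'a')
-- items of A's dict after j popping iterations
def Lmap (j : Nat) : List (String × Option Unit) :=
  (List.range j).map (fun i => (dkey i, (none : Option Unit)))

theorem dkey_ne_akey (i k : Nat) : dkey i ≠ akey k := by
  unfold dkey akey
  rw [Ne, String.ofList_inj]
  intro h
  have hm : ('d' : Char) ∈ List.replicate k 'a' := by rw [← h]; simp
  simp at hm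

theorem dkey_inj (i i' : Nat) : dkey i = dkey i' ↔ i = i' := by
  unfold dkey
  rw [String.ofList_inj]
  constructor
  · intro h
    have := congrArg List.length h
    simpa using this
  · intro h; rw [h]

theorem ofList_append_str (l l' : List Char) :
    String.ofList l ++ String.ofList l' = String.ofList (l ++ l') := by simp

theorem akey_append_a (j : Nat) : akey j ++ "a" = akey (j + 1) := by
  have : ("a" : String) = String.ofList ['a'] := rfl
  rw [akey, akey, this, ofList_append_str, ← List.replicate_succ']

theorem akey_append_d (j : Nat) : akey j ++ "d" = dkey j := by
  have : ("d" : String) = String.ofList ['d'] := rfl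
  rw [akey, this, ofList_append_str]; rfl

-- state of A's loop after j popping iterations
def stateA (j : Nat) : String × PySem.Dict String (Option Unit) :=
  (akey j, PySem.Dict.mk (Lmap j))

theorem insert2 (j : Nat) :
    ((PySem.Dict.mk (Lmap j)).insert (akey (j+1)) (none : Option Unit)).insert (dkey j) none
      = PySem.Dict.mk (Lmap j ++ [(akey (j+1), none), (dkey j, none)]) := by
  have hc1 : (PySem.Dict.mk (Lmap j)).contains (akey (j+1)) = false := by
    rw [PySem.Dict.contains_mk]
    simp only [List.any_eq_false, Lmap]
    intro p hp
    simp only [List.mem_map, List.mem_range] at hp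
    obtain ⟨i, _, rfl⟩ := hp
    simpa using dkey_ne_akey i (j+1)
  have h1 : ((PySem.Dict.mk (Lmap j)).insert (akey (j+1)) (none : Option Unit)).items
      = Lmap j ++ [(akey (j+1), none)] := by
    rw [PySem.Dict.items_insert_of_not_contains (PySem.Dict.mk (Lmap j))
      (none : Option Unit) hc1]
  have hc2 : ((PySem.Dict.mk (Lmap j)).insert (akey (j+1)) (none : Option Unit)).contains
      (dkey j) = false := by
    have hck : ∀ (d : PySem.Dict String (Option Unit)), d.contains (dkey j)
        = d.items.any (fun p => p.1 == dkey j) := by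
      intro d; cases d; rw [PySem.Dict.contains_mk]
    rw [hck, h1]
    simp only [List.any_append, List.any_eq_false, Bool.or_eq_false_iff, Lmap]
    refine ⟨?_, ?_⟩
    · intro p hp
      simp only [List.mem_map, List.mem_range] at hp
      obtain ⟨i, hij, rfl⟩ := hp
      simp [dkey_inj]
      omega
    · simpa using (dkey_ne_akey j (j+1)).symm
  have h2 := PySem.Dict.items_insert_of_not_contains
    ((PySem.Dict.mk (Lmap j)).insert (akey (j+1)) (none : Option Unit))
    (none : Option Unit) hc2
  apply PySem.Dict.ext
  rw [h2, h1]
  simp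

theorem pop2 (j : Nat) :
    (PySem.Dict.mk (Lmap j ++ [(akey (j+1), none), (dkey j, none)])).pop? (akey (j+1))
      = some ((none : Option Unit), PySem.Dict.mk (Lmap j ++ [(dkey j, none)])) := by
  have hfind : List.find? (fun p => p.1 == akey (j+1)) (Lmap j) = none := by
    rw [List.find?_eq_none]
    intro p hp
    simp only [Lmap, List.mem_map, List.mem_range] at hp
    obtain ⟨i, _, rfl⟩ := hp
    simpa using dkey_ne_akey i (j+1)
  have hfil : (Lmap j).filter (fun p => !(p.1 == akey (j+1))) = Lmap j := by
    rw [List.filter_eq_self]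
    intro p hp
    simp only [Lmap, List.mem_map, List.mem_range] at hp
    obtain ⟨i, _, rfl⟩ := hp
    simpa using dkey_ne_akey i (j+1)
  have hne : (dkey j == akey (j+1)) = false := by
    simpa using dkey_ne_akey j (j+1)
  simp [PySem.Dict.pop?, PySem.Dict.get?, PySem.Dict.erase, List.find?_append,
    hfind, hfil, hne]

theorem Lmap_succ (j : Nat) : Lmap j ++ [(dkey j, none)] = Lmap (j+1) := by
  simp [Lmap, List.range_succ]

theorem bodyA_eval (level : Int) (j : Nat) :
    wavedecBodyA level (stateA j) (j : Int)
      = if (j : Int) < level - 1 then stateA (j+1)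
        else (akey (j+1), PySem.Dict.mk (Lmap j ++ [(akey (j+1), none), (dkey j, none)])) := by
  have hto : ((j : Int) + 1).toNat = j + 1 := by omega
  have hak : String.ofList (PySem.List.pyRepeat ['a'] ((j : Int) + 1)) = akey (j+1) := by
    rw [PySem.List.pyRepeat_singleton, hto]; rfl
  unfold wavedecBodyA stateA
  simp only [List.foldl_cons, List.foldl_nil, akey_append_a, akey_append_d, hak,
    insert2, pop2, Lmap_succ]

theorem inv_loop (level : Int) (j : Nat) (hj : (j : Int) ≤ level - 1) :
    (PySem.List.pyRange 0 (j : Int) 1).foldl (wavedecBodyA level) ("", PySem.Dict.empty)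
      = stateA j := by
  induction j with
  | zero =>
    rw [PySem.List.pyRange_one_eq_nil (by omega)]
    rfl
  | succ n ih =>
    have h1 : ((n + 1 : Nat) : Int) = (n : Int) + 1 := by push_cast; ring
    rw [h1, PySem.List.pyRange_one_succ_right (by omega), List.foldl_append,
      ih (by omega)]
    simp only [List.foldl_cons, List.foldl_nil]
    rw [bodyA_eval level n, if_pos (by omega)]

theorem wavedec_main (level : Int) : wavedec_keys level = wavedec_keys_alt level := by
  by_cases h : level < 1
  · unfold wavedec_keys wavedec_keys_alt
    rw [PySem.List.pyRange_one_eq_nil (by omega), if_pos h]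
    rfl
  · have hm : level = ((level.toNat - 1 : Nat) : Int) + 1 := by omega
    have hstep : PySem.List.pyRange 0 level 1
        = PySem.List.pyRange 0 ((level.toNat - 1 : Nat) : Int) 1
          ++ [((level.toNat - 1 : Nat) : Int)] := by
      rw [hm]
      exact PySem.List.pyRange_one_succ_right (by omega)
    unfold wavedec_keys
    rw [hstep, List.foldl_append, inv_loop level (level.toNat - 1) (by omega)]
    simp only [List.foldl_cons, List.foldl_nil]
    rw [bodyA_eval level (level.toNat - 1), if_neg (by omega)]
    unfold wavedec_keys_alt
    rw [if_neg h]
    have h2 : level.toNat - 1 + 1 = level.toNat := by omega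
    have h3 : (level - 1).toNat = level.toNat - 1 := by omega
    simp only [PySem.Dict.keys_mk, List.map_append, Lmap, List.map_map, h2, h3]
    simp only [List.map_cons, List.map_nil]
    congr 1
    · apply List.map_congr_left
      intro i _
      simp [Function.comp, dkey]
    · simp [akey, dkey]

-- ===== VERDICT (by name: the statement is the Claim_ definition above) =====
theorem wavedec_keys_spec : Claim_equal_wavedec_keys := by
  intro level _
  unfold Spec_wavedec_keys
  exact wavedec_main level
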